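-- pv_equiv track=rewrite | github.com/roadtools/roadprofile | roadprofile/utils.py | _iter_dropout_intervals
-- ===== SOURCE A (Python) =====
-- def _iter_dropout_intervals(drop_outs):
--     idx = 0
--     count = 0
--     while idx < len(drop_outs):
--         try:
--             consecutive = (drop_outs[idx + 1] - drop_outs[idx]) == 1
--         except IndexError:
--             yield drop_outs[idx - count], drop_outs[idx] + 1
--             break
--         if consecutive:
--             count += 1
--             idx += 1
--         else:
--             yield drop_outs[idx - count], drop_outs[idx] + 1
--             idx += 1
--             count = 0
-- ===== SOURCE B (Python) =====
-- def _iter_dropout_intervals(drop_outs):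
--     if not drop_outs:
--         return
--     starts = [drop_outs[0]] + [b for a, b in zip(drop_outs, drop_outs[1:]) if b - a != 1]
--     ends = [a + 1 for a, b in zip(drop_outs, drop_outs[1:]) if b - a != 1] + [drop_outs[-1] + 1]
--     yield from zip(starts, ends)
-- ===== Notes on version B (the rewrite author's own statement) =====
-- stated objective: idiomatic
-- what changed: Replaced A's stateful idx/count while-loop with try/except flush by a single boundary detection over zip(drop_outs, drop_outs[1:]) producing the run starts and run ends as two comprehensions, yielded via zip(starts, ends).
import Mathlib
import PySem

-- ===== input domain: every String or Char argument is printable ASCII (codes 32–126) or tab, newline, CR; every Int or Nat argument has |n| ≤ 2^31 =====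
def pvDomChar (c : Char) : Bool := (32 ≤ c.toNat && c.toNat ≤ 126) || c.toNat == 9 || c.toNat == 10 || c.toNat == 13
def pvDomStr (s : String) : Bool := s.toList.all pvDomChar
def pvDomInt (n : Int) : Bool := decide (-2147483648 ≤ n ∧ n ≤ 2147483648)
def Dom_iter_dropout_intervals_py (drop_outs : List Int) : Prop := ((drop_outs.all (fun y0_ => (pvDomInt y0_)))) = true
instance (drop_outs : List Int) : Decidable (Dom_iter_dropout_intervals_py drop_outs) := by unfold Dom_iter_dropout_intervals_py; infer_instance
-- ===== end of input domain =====

-- B replaces A's stateful idx/count while-loop (with its try/except flush) by detecting the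
-- run boundaries once over zipped adjacent pairs and zipping the starts with the ends (idiomatic).
-- A and B are Python generators; the equivalence is about the yielded sequence of tuples.

-- ===== PORT A =====
-- while-loop of A as recursion on idx; all three subscripts are in range whenever evaluated
-- (0 ≤ idx - count ≤ idx < len, Nat subtraction), so List.getD _ _ 0 is exact there.
def iterDropLoopA (xs : List Int) (idx count : Nat) : List (Int × Int) :=
  if _h : idx < xs.length then
    if _h2 : idx + 1 < xs.length then
      -- consecutive = (drop_outs[idx+1] - drop_outs[idx]) == 1
      if xs.getD (idx + 1) 0 - xs.getD idx 0 = 1 then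
        iterDropLoopA xs (idx + 1) (count + 1)
      else
        (xs.getD (idx - count) 0, xs.getD idx 0 + 1) :: iterDropLoopA xs (idx + 1) 0
    else
      -- IndexError branch: yield and break
      [(xs.getD (idx - count) 0, xs.getD idx 0 + 1)]
  else []
termination_by xs.length - idx

def iter_dropout_intervals_py (drop_outs : List Int) : List (Int × Int) :=
  iterDropLoopA drop_outs 0 0

-- ===== PORT B =====
-- drop_outs[-1] on the nonempty list is exactly List.getLastD
def iter_dropout_intervals_py_alt (drop_outs : List Int) : List (Int × Int) :=
  match drop_outs with
  | [] => []
  | x :: rest =>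
    let pairs := (x :: rest).zip rest      -- zip(drop_outs, drop_outs[1:])
    let starts := x :: pairs.filterMap (fun p => if p.2 - p.1 ≠ 1 then some p.2 else none)
    let ends := pairs.filterMap (fun p => if p.2 - p.1 ≠ 1 then some (p.1 + 1) else none)
                  ++ [rest.getLastD x + 1]
    starts.zip ends

-- ===== PRECONDITION & SPEC =====
def Spec_iter_dropout_intervals_py (drop_outs : List Int) (out : List (Int × Int)) : Prop := out = iter_dropout_intervals_py_alt drop_outs
instance (drop_outs : List Int) (out : List (Int × Int)) : Decidable (Spec_iter_dropout_intervals_py drop_outs out) := by unfold Spec_iter_dropout_intervals_py; infer_instance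

-- ===== CLAIM (what is proved, stated in full; the proofs are below) =====
def Claim_equal_iter_dropout_intervals_py : Prop := ∀ (drop_outs : List Int), Dom_iter_dropout_intervals_py drop_outs → Spec_iter_dropout_intervals_py drop_outs (iter_dropout_intervals_py drop_outs)

-- ===== LEMMAS AND PROOFS =====

-- canonical run-splitter: start of current run s, previous value p, remaining tail
def dropSpec (s p : Int) : List Int → List (Int × Int)
  | [] => [(s, p + 1)]
  | v :: r => if v - p = 1 then dropSpec s v r else (s, p + 1) :: dropSpec v v r

theorem iterDropLoopA_eq_dropSpec (xs : List Int) (idx count : Nat) (h : idx < xs.length) :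
    iterDropLoopA xs idx count
      = dropSpec (xs.getD (idx - count) 0) (xs.getD idx 0) (xs.drop (idx + 1)) := by
  have hn : xs.length - idx = (xs.length - (idx + 1)) + 1 := by omega
  generalize hfuel : xs.length - idx = n at hn
  induction n generalizing idx count with
  | zero => omega
  | succ n ih =>
    rw [iterDropLoopA]
    by_cases h2 : idx + 1 < xs.length
    · have hdrop : xs.drop (idx + 1) = xs.getD (idx + 1) 0 :: xs.drop (idx + 2) := by
        rw [List.getD_eq_getElem?_getD, List.getElem?_eq_getElem h2]
        simpa using (List.drop_eq_getElem_cons (l := xs) (n := idx + 1) h2)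
      by_cases hc : xs.getD (idx + 1) 0 - xs.getD idx 0 = 1
      · simp only [dif_pos h, dif_pos h2, if_pos hc]
        rw [ih (idx + 1) (count + 1) h2 (by omega) (by omega)]
        rw [hdrop, dropSpec, if_pos hc]
        have he : idx + 1 - (count + 1) = idx - count := by omega
        rw [he]
      · simp only [dif_pos h, dif_pos h2, if_neg hc]
        rw [ih (idx + 1) 0 h2 (by omega) (by omega)]
        rw [hdrop, dropSpec, if_neg hc]
        simp
    · have hlen : xs.length = idx + 1 := by omega
      have hdrop : xs.drop (idx + 1) = [] := by
        apply List.drop_eq_nil_of_le; omega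
      simp only [dif_pos h, dif_neg h2, hdrop, dropSpec]

theorem alt_eq_dropSpec (rest : List Int) (s p : Int) :
    dropSpec s p rest
      = (s :: ((p :: rest).zip rest).filterMap
            (fun q => if q.2 - q.1 ≠ 1 then some q.2 else none)).zip
        (((p :: rest).zip rest).filterMap
            (fun q => if q.2 - q.1 ≠ 1 then some (q.1 + 1) else none)
          ++ [rest.getLastD p + 1]) := by
  induction rest generalizing s p with
  | nil => simp [dropSpec]
  | cons v r ih =>
    by_cases hc : v - p = 1
    · simp only [dropSpec, if_pos hc, List.zip_cons_cons, List.filterMap_cons]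
      have : ¬ v - p ≠ 1 := by omega
      simp only [if_neg this, List.getLastD_cons]
      exact ih s v
    · simp only [dropSpec, if_neg hc, List.zip_cons_cons, List.filterMap_cons]
      simp only [if_pos hc, List.getLastD_cons]
      rw [ih v v]
      simp

-- ===== VERDICT (by name: the statement is the Claim_ definition above) =====
theorem iter_dropout_intervals_py_spec : Claim_equal_iter_dropout_intervals_py := by
  intro drop_outs _
  unfold Spec_iter_dropout_intervals_py iter_dropout_intervals_py iter_dropout_intervals_py_alt
  cases drop_outs with
  | nil => rw [iterDropLoopA]; simp
  | cons x rest =>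
    rw [iterDropLoopA_eq_dropSpec (x :: rest) 0 0 (by simp)]
    simpa using alt_eq_dropSpec rest x x
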